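-- pv_equiv track=rewrite | github.com/codevr7/samples | my_own_series.py | mine
-- ===== SOURCE A (Python) =====
-- def mine(n): # defining the series MINE
--     if n == 1: #if n input is 1 or 2 giving the respective outputs
--         return 0
--     elif n == 2:
--         return 1
--     else: #if n input is not 1 or 2...
--         x = 1
--         y = 1
--         for i in range (1,n-1): #setting a range for number
--             z = x + (y+1) #how this series works
--             y = y + 1 #changing the values
--             x = z
--         return z #returning the output
-- ===== SOURCE B (Python) =====
-- def mine(n):
--     # closed form: the series is the triangular numbers, term n = n*(n-1)/2
--     return n * (n - 1) // 2
-- ===== Notes on version B (the rewrite author's own statement) =====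
-- stated objective: faster
-- what changed: Replaced the O(n) accumulation loop with the closed-form triangular-number formula n*(n-1)//2.
-- outside the precondition, e.g. on mine(0): A raises UnboundLocalError, B returns 0
import Mathlib
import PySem

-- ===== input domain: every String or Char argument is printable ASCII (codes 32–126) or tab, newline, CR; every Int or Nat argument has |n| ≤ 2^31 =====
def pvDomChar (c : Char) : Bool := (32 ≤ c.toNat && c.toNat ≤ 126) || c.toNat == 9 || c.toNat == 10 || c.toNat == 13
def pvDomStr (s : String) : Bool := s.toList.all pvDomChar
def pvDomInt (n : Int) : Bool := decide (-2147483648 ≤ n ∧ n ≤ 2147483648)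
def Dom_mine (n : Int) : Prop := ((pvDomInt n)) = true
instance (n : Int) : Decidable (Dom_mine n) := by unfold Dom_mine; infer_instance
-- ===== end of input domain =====

-- B replaces A's O(n) accumulation loop by the closed-form triangular-number formula n*(n-1)//2 (objective: faster).

-- ===== PORT A =====
-- loop state (x, y, z); z starts at 0 only as a placeholder for Python's unbound z
-- (under Pre_mine the else-branch loop is never empty, so z is always assigned)
def mineStep (st : Int × Int × Int) (_ : Int) : Int × Int × Int :=
  let z := st.1 + (st.2.1 + 1)
  (z, st.2.1 + 1, z)

def mine (n : Int) : Int :=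
  if n = 1 then 0
  else if n = 2 then 1
  else
    let s := (PySem.List.pyRange 1 (n - 1) 1).foldl mineStep (1, 1, 0)
    s.2.2

-- ===== PORT B =====
def mine_alt (n : Int) : Int := PySem.Int.floordiv (n * (n - 1)) 2

-- ===== PRECONDITION & SPEC =====
-- Pre_ excludes n ≤ 0, where A's loop never runs and it raises UnboundLocalError.
def Pre_mine (n : Int) : Prop := 1 ≤ n
instance (n : Int) : Decidable (Pre_mine n) := by unfold Pre_mine; infer_instance
def pvWitness_mine : Int := 5

def Spec_mine (n : Int) (out : Int) : Prop := out = mine_alt n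
instance (n : Int) (out : Int) : Decidable (Spec_mine n out) := by unfold Spec_mine; infer_instance

-- ===== CLAIM (what is proved, stated in full; the proofs are below) =====
def Claim_equal_mine : Prop := ∀ (n : Int), Dom_mine n → Pre_mine n → Spec_mine n (mine n)

-- ===== LEMMAS AND PROOFS =====

-- the loop invariant: after running over range(1, m+2) (i.e. m+1 iterations),
-- y = m+2 and x = z = t with 2*t = (m+2)*(m+3)
lemma mine_loop (m : Nat) :
    ∃ t : Int, (PySem.List.pyRange 1 ((m : Int) + 2) 1).foldl mineStep (1, 1, 0)
        = (t, (m : Int) + 2, t) ∧ 2 * t = ((m : Int) + 2) * ((m : Int) + 3) := by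
  induction m with
  | zero =>
      refine ⟨3, ?_, by ring⟩
      have h : PySem.List.pyRange 1 (2 : Int) 1 = [1] := PySem.List.pyRange_one_singleton 1
      simp [h, mineStep]
  | succ k ih =>
      obtain ⟨t, hfold, ht⟩ := ih
      refine ⟨t + ((k : Int) + 3), ?_, by push_cast; ring_nf; ring_nf at ht; omega⟩
      push_cast
      rw [show ((k : Int) + 1) + 2 = ((k : Int) + 2) + 1 by ring,
        PySem.List.pyRange_one_succ_right (show (1 : Int) ≤ (k : Int) + 2 by omega)]
      rw [List.foldl_append, hfold]
      simp [mineStep]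
      push_cast
      ring_nf

lemma floordiv_two_mul (t : Int) : PySem.Int.floordiv (2 * t) 2 = t := by
  rw [PySem.Int.floordiv_eq_ediv_of_pos (by omega)]
  omega

-- ===== VERDICT (by name: the statement is the Claim_ definition above) =====
theorem mine_spec : Claim_equal_mine := by
  intro n _ hpre
  unfold Spec_mine mine mine_alt Pre_mine at *
  by_cases h1 : n = 1
  · subst h1; decide
  by_cases h2 : n = 2
  · subst h2; decide
  -- n ≥ 3
  have h3 : 3 ≤ n := by omega
  obtain ⟨m, hm⟩ : ∃ m : Nat, n = (m : Int) + 3 := ⟨(n - 3).toNat, by omega⟩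
  obtain ⟨t, hfold, ht⟩ := mine_loop m
  have hn1 : n - 1 = (m : Int) + 2 := by omega
  simp only [if_neg h1, if_neg h2, hn1, hfold]
  have hkey : n * ((m : Int) + 2) = 2 * t := by rw [hm]; linarith [ht]
  rw [hkey, floordiv_two_mul]
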